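-- pv_equiv track=rewrite | github.com/TomoTom0/yt_pyXspec | yt_pyXspec/yt_pyXspec.py | ignore_specified_range
-- ===== SOURCE A (Python) =====
-- def ignore_specified_range(ignore_x_lim, xs):  # , *args
--     if not hasattr(ignore_x_lim, "__iter__"):
--         return xs  # , *args
--     judged_xs = []
--     # arr_judge=[]
--     for val_x in xs:
--         judge = True
--         for x_lim in ignore_x_lim:
--             if val_x >= min(x_lim) and val_x <= max(x_lim):
--                 judge = False
--                 break
--         # arr_judge.append(judge)
--         if judge is True:
--             judged_xs.append(val_x)
--         else:
--             judged_xs.append(None)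
--
--     # arr_ret=[]
--     # for arg in args:
--     #    if len(arg)!=len(arr_judge):
--     #        arr_ret.append(arg)
--     #        continue
--     #    arr_tmp=[]
--     #    for judge, val_a in zip(arr_judge,arg):
--     #        if judge is True:
--     #            arr_tmp.append(val_a)
--     #        else:
--     #            arr_tmp.append(None)
--     #    arr_ret.append(arr_tmp)
--     # return judged_xs, *arr_ret
--     return judged_xs
-- ===== SOURCE B (Python) =====
-- def ignore_specified_range(ignore_x_lim, xs):
--     if not hasattr(ignore_x_lim, "__iter__"):
--         return xs
--     # precompute each interval's bounds once, sort by lower bound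
--     bounds = sorted(((min(lim), max(lim)) for lim in ignore_x_lim), key=lambda p: p[0])
--     starts = [lo for lo, _ in bounds]
--     # cover[i] = max upper bound among bounds[0..i]
--     cover = []
--     best = None
--     for _, hi in bounds:
--         if best is None or hi > best:
--             best = hi
--         cover.append(best)
--     out = []
--     n = len(starts)
--     for x in xs:
--         # binary search: lo ends as the number of starts <= x
--         lo, hi = 0, n
--         while lo < hi:
--             mid = (lo + hi) // 2
--             if starts[mid] <= x:
--                 lo = mid + 1
--             else:
--                 hi = mid
--         if lo > 0 and cover[lo - 1] >= x:
--             out.append(None)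
--         else:
--             out.append(x)
--     return out
-- ===== Notes on version B (the rewrite author's own statement) =====
-- stated objective: faster
-- what changed: B precomputes each interval's (min,max) once, sorts the intervals by lower bound with a prefix-maximum of upper bounds, and binary-searches each x instead of rescanning (and re-computing min/max of) every interval per x.
-- outside the precondition, e.g. on ignore_specified_range([[0, 5], []], [1]): A returns [None], B raises ValueError
import Mathlib
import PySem

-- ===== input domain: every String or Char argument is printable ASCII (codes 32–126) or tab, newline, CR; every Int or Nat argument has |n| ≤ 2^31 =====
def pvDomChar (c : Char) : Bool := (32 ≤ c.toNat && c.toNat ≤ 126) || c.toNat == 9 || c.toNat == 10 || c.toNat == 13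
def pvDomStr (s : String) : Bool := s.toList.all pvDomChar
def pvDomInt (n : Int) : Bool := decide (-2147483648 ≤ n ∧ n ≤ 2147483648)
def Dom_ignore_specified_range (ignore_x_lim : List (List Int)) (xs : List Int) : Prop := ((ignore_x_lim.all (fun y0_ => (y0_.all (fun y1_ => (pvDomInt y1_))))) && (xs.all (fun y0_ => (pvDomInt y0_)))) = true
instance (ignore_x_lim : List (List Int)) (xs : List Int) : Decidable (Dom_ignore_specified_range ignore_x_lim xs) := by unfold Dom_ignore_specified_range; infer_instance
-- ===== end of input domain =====

-- B replaces A's per-x rescan (with repeated min/max) of every interval by precomputed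
-- sorted bounds + prefix-max of upper bounds + a binary search per x (objective: faster).

-- ===== PORT A =====
-- A's inner 'for x_lim in ignore_x_lim' loop with break; min?/max? = none is Python's
-- ValueError on an empty x_lim (excluded by Pre_), the fall-through branch is then unreachable
def pvAJudge (ignore_x_lim : List (List Int)) (val_x : Int) : Bool :=
  match ignore_x_lim with
  | [] => true
  | x_lim :: rest =>
    match PySem.List.min? x_lim (fun v => v), PySem.List.max? x_lim (fun v => v) with
    | some lo, some hi => if lo ≤ val_x ∧ val_x ≤ hi then false else pvAJudge rest val_x
    | _, _ => pvAJudge rest val_x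

def ignore_specified_range (ignore_x_lim : List (List Int)) (xs : List Int) : List (Option Int) :=
  xs.foldl (fun judged_xs val_x =>
    judged_xs ++ [if pvAJudge ignore_x_lim val_x then some val_x else none]) []

-- ===== PORT B =====
-- (min(lim), max(lim)); (0,0) stands for Source B's ValueError on an empty lim (excluded by Pre_)
def pvBound (lim : List Int) : Int × Int :=
  match PySem.List.min? lim (fun v => v), PySem.List.max? lim (fun v => v) with
  | some lo, some hi => (lo, hi)
  | _, _ => (0, 0)

-- one step of Source B's prefix-max loop: state = (cover so far, best); best=None is the first step
def pvCoverStep (st : List Int × Option Int) (p : Int × Int) : List Int × Option Int :=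
  match st.2 with
  | none => (st.1 ++ [p.2], some p.2)
  | some b => if p.2 > b then (st.1 ++ [p.2], some p.2) else (st.1 ++ [b], some b)

-- Source B's while-loop binary search (mid = (lo+hi)//2 inlined); starts[mid] is always
-- in range when invoked with hi ≤ starts.length, so getD is exact there
def pvBS (starts : List Int) (x : Int) (lo hi : Nat) : Nat :=
  if lo < hi then
    if starts.getD ((lo + hi) / 2) 0 ≤ x then pvBS starts x ((lo + hi) / 2 + 1) hi
    else pvBS starts x lo ((lo + hi) / 2)
  else lo
termination_by hi - lo
decreasing_by all_goals omega

def ignore_specified_range_alt (ignore_x_lim : List (List Int)) (xs : List Int) : List (Option Int) :=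
  let bounds := PySem.List.sorted (ignore_x_lim.map pvBound) Prod.fst false
  let starts := bounds.map Prod.fst
  let cover := (bounds.foldl pvCoverStep ([], none)).1
  let n := starts.length
  xs.foldl (fun out x =>
    let i := pvBS starts x 0 n
    out ++ [if 0 < i ∧ x ≤ cover.getD (i - 1) 0 then none else some x]) []

-- ===== PRECONDITION & SPEC =====
-- Pre_ excludes inputs containing an empty inner interval list: Python's min([]) raises
-- ValueError — A raises on them unless every x is stopped by an earlier interval (and B always raises)
def Pre_ignore_specified_range (ignore_x_lim : List (List Int)) (xs : List Int) : Prop :=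
  ∀ lim ∈ ignore_x_lim, lim ≠ []
instance (ignore_x_lim : List (List Int)) (xs : List Int) : Decidable (Pre_ignore_specified_range ignore_x_lim xs) := by unfold Pre_ignore_specified_range; infer_instance
def pvWitness_ignore_specified_range : List (List Int) × List Int := ([[1, 3], [7, 5]], [0, 2, 6, 9])

def Spec_ignore_specified_range (ignore_x_lim : List (List Int)) (xs : List Int) (out : List (Option Int)) : Prop := out = ignore_specified_range_alt ignore_x_lim xs
instance (ignore_x_lim : List (List Int)) (xs : List Int) (out : List (Option Int)) : Decidable (Spec_ignore_specified_range ignore_x_lim xs out) := by unfold Spec_ignore_specified_range; infer_instance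

-- ===== CLAIM (what is proved, stated in full; the proofs are below) =====
def Claim_equal_ignore_specified_range : Prop := ∀ (ignore_x_lim : List (List Int)) (xs : List Int), Dom_ignore_specified_range ignore_x_lim xs → Pre_ignore_specified_range ignore_x_lim xs → Spec_ignore_specified_range ignore_x_lim xs (ignore_specified_range ignore_x_lim xs)

-- ===== LEMMAS AND PROOFS =====

-- A's judge loop is the negated 'some interval's bounds enclose x' test
theorem pvAJudge_eq (igl : List (List Int)) (x : Int)
    (h : ∀ lim ∈ igl, lim ≠ []) :
    pvAJudge igl x = !(igl.any (fun lim => decide ((pvBound lim).1 ≤ x ∧ x ≤ (pvBound lim).2))) := by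
  induction igl with
  | nil => simp [pvAJudge]
  | cons lim rest ih =>
    have hne : lim ≠ [] := h lim (by simp)
    have hmin : ∃ lo, PySem.List.min? lim (fun v => v) = some lo := by
      cases hm : PySem.List.min? lim (fun v => v) with
      | none => exact absurd ((PySem.List.min?_eq_none_iff lim (fun v => v)).mp hm) hne
      | some lo => exact ⟨lo, rfl⟩
    have hmax : ∃ hi, PySem.List.max? lim (fun v => v) = some hi := by
      cases hm : PySem.List.max? lim (fun v => v) with
      | none => exact absurd ((PySem.List.max?_eq_none_iff lim (fun v => v)).mp hm) hne
      | some hi => exact ⟨hi, rfl⟩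
    obtain ⟨lo, hlo⟩ := hmin
    obtain ⟨hi, hhi⟩ := hmax
    have hb : pvBound lim = (lo, hi) := by simp [pvBound, hlo, hhi]
    have ih' := ih (fun l hl => h l (by simp [hl]))
    simp only [pvAJudge, hlo, hhi, List.any_cons, hb]
    by_cases hc : lo ≤ x ∧ x ≤ hi
    · simp [hc]
    · simp [hc, ih']

-- Source B's prefix-max fold, with the running accumulator made explicit
def pvCov : List (Int × Int) → Option Int → List Int
  | [], _ => []
  | p :: t, none => p.2 :: pvCov t (some p.2)
  | p :: t, some b => (if p.2 > b then p.2 else b) :: pvCov t (some (if p.2 > b then p.2 else b))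

theorem pvCoverStep_foldl (bs : List (Int × Int)) (acc : List Int) (b : Option Int) :
    (bs.foldl pvCoverStep (acc, b)).1 = acc ++ pvCov bs b := by
  induction bs generalizing acc b with
  | nil => simp [pvCov]
  | cons p t ih =>
    cases b with
    | none => simp [List.foldl_cons, pvCoverStep, pvCov, ih]
    | some bb =>
      by_cases hc : p.2 > bb
      · simp [List.foldl_cons, pvCoverStep, pvCov, hc, ih]
      · simp [List.foldl_cons, pvCoverStep, pvCov, hc, ih]

-- cover[k] is the prefix maximum: x ≤ cover[k] iff some bound among the first k+1 (or the seed) reaches x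
theorem pvCov_getD (bs : List (Int × Int)) (b : Option Int) (x : Int) (k : Nat) (hk : k < bs.length) :
    x ≤ (pvCov bs b).getD k 0 ↔
      (∃ j, j ≤ k ∧ ∃ hj : j < bs.length, x ≤ bs[j].2) ∨ (∃ bb, b = some bb ∧ x ≤ bb) := by
  induction bs generalizing b k with
  | nil => simp at hk
  | cons p t ih =>
    have hbest : ∀ m : Int, (x ≤ (if p.2 > m then p.2 else m)) ↔ (x ≤ p.2 ∨ x ≤ m) := by
      intro m; split <;> omega
    cases k with
    | zero =>
      cases b with
      | none =>
        simp only [pvCov, List.getD_cons_zero]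
        constructor
        · intro hx; exact Or.inl ⟨0, le_refl _, by simpa using hk, by simpa using hx⟩
        · rintro (⟨j, hj0, hjl, hx⟩ | ⟨bb, hbb, _⟩)
          · interval_cases j; simpa using hx
          · exact absurd hbb (by simp)
      | some bb =>
        simp only [pvCov, List.getD_cons_zero, hbest]
        constructor
        · rintro (hx | hx)
          · exact Or.inl ⟨0, le_refl _, by simpa using hk, by simpa using hx⟩
          · exact Or.inr ⟨bb, rfl, hx⟩
        · rintro (⟨j, hj0, hjl, hx⟩ | ⟨bb', hbb', hx⟩)
          · interval_cases j; exact Or.inl (by simpa using hx)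
          · cases hbb'; exact Or.inr hx
    | succ k' =>
      have hk' : k' < t.length := by simpa using hk
      cases b with
      | none =>
        simp only [pvCov, List.getD_cons_succ]
        rw [ih (some p.2) k' hk']
        constructor
        · rintro (⟨j, hj, hjl, hx⟩ | ⟨bb, hbb, hx⟩)
          · exact Or.inl ⟨j + 1, by omega, by simpa using hjl, by simpa using hx⟩
          · cases hbb; exact Or.inl ⟨0, by omega, by simp, by simpa using hx⟩
        · rintro (⟨j, hj, hjl, hx⟩ | ⟨bb, hbb, _⟩)
          · cases j with
            | zero => exact Or.inr ⟨p.2, rfl, by simpa using hx⟩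
            | succ j' => exact Or.inl ⟨j', by omega, by simpa using hjl, by simpa using hx⟩
          · exact absurd hbb (by simp)
      | some bb =>
        simp only [pvCov, List.getD_cons_succ]
        rw [ih (some (if p.2 > bb then p.2 else bb)) k' hk']
        constructor
        · rintro (⟨j, hj, hjl, hx⟩ | ⟨bb', hbb', hx⟩)
          · exact Or.inl ⟨j + 1, by omega, by simpa using hjl, by simpa using hx⟩
          · cases hbb'
            rcases (hbest bb).mp hx with h1 | h1
            · exact Or.inl ⟨0, by omega, by simp, by simpa using h1⟩
            · exact Or.inr ⟨bb, rfl, h1⟩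
        · rintro (⟨j, hj, hjl, hx⟩ | ⟨bb', hbb', hx⟩)
          · cases j with
            | zero => exact Or.inr ⟨_, rfl, (hbest bb).mpr (Or.inl (by simpa using hx))⟩
            | succ j' => exact Or.inl ⟨j', by omega, by simpa using hjl, by simpa using hx⟩
          · cases hbb'; exact Or.inr ⟨_, rfl, (hbest bb).mpr (Or.inr hx)⟩

-- binary-search invariant: on a sorted list pvBS returns the split point between ≤ x and > x
theorem pvBS_spec (starts : List Int) (x : Int)
    (hs : starts.Pairwise (· ≤ ·)) (lo hi : Nat)
    (hlh : lo ≤ hi) (hhn : hi ≤ starts.length)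
    (hlo : ∀ j < lo, starts.getD j 0 ≤ x)
    (hhi : ∀ j, hi ≤ j → j < starts.length → x < starts.getD j 0) :
    lo ≤ pvBS starts x lo hi ∧ pvBS starts x lo hi ≤ hi ∧
      (∀ j < pvBS starts x lo hi, starts.getD j 0 ≤ x) ∧
      (∀ j, pvBS starts x lo hi ≤ j → j < starts.length → x < starts.getD j 0) := by
  have hmono : ∀ p q : Nat, p ≤ q → q < starts.length →
      starts.getD p 0 ≤ starts.getD q 0 := by
    intro p q hpq hq
    have hp : p < starts.length := by omega
    rw [List.getD_eq_getElem _ _ hp, List.getD_eq_getElem _ _ hq]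
    rcases Nat.lt_or_ge p q with h | h
    · exact (List.pairwise_iff_getElem.mp hs) p q hp hq h
    · have : p = q := by omega
      subst this; rfl
  induction lo, hi using pvBS.induct starts x with
  | case1 lo hi hlt hle ih =>
    rw [pvBS, if_pos hlt, if_pos hle]
    have := ih (by omega) hhn
      (by
        intro j hj
        rcases Nat.lt_or_ge j lo with h | h
        · exact hlo j h
        · exact le_trans (hmono j ((lo + hi) / 2) (by omega) (by omega)) hle)
      hhi
    exact ⟨by omega, this.2.1, this.2.2⟩
  | case2 lo hi hlt hgt ih =>
    rw [pvBS, if_pos hlt, if_neg hgt]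
    have := ih (by omega) (by omega) hlo
      (by
        intro j hj hjl
        exact lt_of_lt_of_le (by omega : x < starts.getD ((lo + hi) / 2) 0) (hmono ((lo + hi) / 2) j hj hjl))
    exact ⟨this.1, by omega, this.2.2⟩
  | case3 lo hi hnlt =>
    rw [pvBS, if_neg hnlt]
    exact ⟨le_refl _, hlh, hlo, fun j hj hjl => hhi j (by omega) hjl⟩

-- per-element agreement of B's binary-search test with A's judge loop
theorem pvElem_eq (igl : List (List Int)) (x : Int) (h : ∀ lim ∈ igl, lim ≠ []) :
    (let bounds := PySem.List.sorted (igl.map pvBound) Prod.fst false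
     let starts := bounds.map Prod.fst
     let cover := (bounds.foldl pvCoverStep ([], none)).1
     let i := pvBS starts x 0 starts.length
     if 0 < i ∧ x ≤ cover.getD (i - 1) 0 then (none : Option Int) else some x) =
    (if pvAJudge igl x then some x else none) := by
  simp only []
  set bounds := PySem.List.sorted (igl.map pvBound) Prod.fst false with hbounds
  set starts := bounds.map Prod.fst with hstarts
  set r := pvBS starts x 0 starts.length with hr
  have hcov : (bounds.foldl pvCoverStep ([], none)).1 = pvCov bounds none := by
    rw [pvCoverStep_foldl]; simp
  have hsort : starts.Pairwise (· ≤ ·) := by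
    rw [hstarts, hbounds]
    exact PySem.List.sorted_map_key_pairwise (igl.map pvBound) Prod.fst
  have hlen : starts.length = bounds.length := by simp [hstarts]
  have hspec := pvBS_spec starts x hsort 0 starts.length (by omega) (le_refl _)
    (by omega) (by omega)
  have hgetD : ∀ j (hj : j < bounds.length), starts.getD j 0 = bounds[j].1 := by
    intro j hj
    rw [hstarts, List.getD_eq_getElem _ _ (by simpa using hj), List.getElem_map]
  have hmem : (∃ p ∈ bounds, p.1 ≤ x ∧ x ≤ p.2) ↔ pvAJudge igl x = false := by
    rw [pvAJudge_eq igl x h]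
    simp only [Bool.not_eq_false', List.any_eq_true, decide_eq_true_iff]
    constructor
    · rintro ⟨p, hp, hx⟩
      have : p ∈ igl.map pvBound := by
        rw [hbounds] at hp
        exact (PySem.List.mem_sorted _ _ _ _).mp hp
      obtain ⟨lim, hlim, rfl⟩ := List.mem_map.mp this
      exact ⟨lim, hlim, hx⟩
    · rintro ⟨lim, hlim, hx⟩
      refine ⟨pvBound lim, ?_, hx⟩
      rw [hbounds]
      exact (PySem.List.mem_sorted _ _ _ _).mpr (List.mem_map.mpr ⟨lim, hlim, rfl⟩)
  have hC : (0 < r ∧ x ≤ (bounds.foldl pvCoverStep ([], none)).1.getD (r - 1) 0) ↔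
      (∃ p ∈ bounds, p.1 ≤ x ∧ x ≤ p.2) := by
    rw [hcov]
    constructor
    · rintro ⟨hr0, hxc⟩
      have hrn : r ≤ bounds.length := by rw [← hlen]; exact hspec.2.1
      have hk : r - 1 < bounds.length := by omega
      rcases (pvCov_getD bounds none x (r - 1) hk).mp hxc with ⟨j, hjk, hjl, hx2⟩ | ⟨bb, hbb, _⟩
      · refine ⟨bounds[j], List.getElem_mem _, ?_, hx2⟩
        have := hspec.2.2.1 j (by omega)
        rwa [hgetD j hjl] at this
      · exact absurd hbb (by simp)
    · rintro ⟨p, hp, hx1, hx2⟩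
      obtain ⟨j, hjl, rfl⟩ := List.mem_iff_getElem.mp hp
      have hjr : j < r := by
        by_contra hge
        have := hspec.2.2.2 j (by omega) (by omega)
        rw [hgetD j hjl] at this
        omega
      refine ⟨by omega, ?_⟩
      exact (pvCov_getD bounds none x (r - 1) (by omega)).mpr (Or.inl ⟨j, by omega, hjl, hx2⟩)
  have hfin := hC.trans hmem
  by_cases hj : pvAJudge igl x = false
  · rw [if_pos (hfin.mpr hj), hj]; simp
  · simp only [Bool.not_eq_false] at hj
    rw [if_neg (fun hc => by simp [hfin.mp hc] at hj), hj]; simp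

-- ===== VERDICT (by name: the statement is the Claim_ definition above) =====
theorem ignore_specified_range_spec : Claim_equal_ignore_specified_range := by
  intro igl xs _ hpre
  unfold Spec_ignore_specified_range ignore_specified_range ignore_specified_range_alt
  rw [PySem.List.foldl_append_singleton_eq_map, PySem.List.foldl_append_singleton_eq_map]
  simp only [List.nil_append]
  exact (List.map_congr_left fun x _ => (pvElem_eq igl x hpre).symm)
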